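-- pv_equiv track=rewrite | github.com/wavenumber-eng/altium_monkey | src/py/altium_monkey/altium_sch_geometry_oracle.py | split_overline_text
-- ===== SOURCE A (Python) =====
-- def split_overline_text(text: str) -> tuple[str, list[int]]:
--     """
--     Return clean text plus character indexes that carry an overline.
--     """
--     clean_chars: list[str] = []
--     overline_segments: list[int] = []
--
--     i = 0
--     while i < len(text):
--         char = text[i]
--         if char == "\\":
--             if clean_chars:
--                 overline_segments.append(len(clean_chars) - 1)
--             i += 1
--             continue
--         clean_chars.append(char)
--         i += 1
--
--     return ("".join(clean_chars), overline_segments)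
-- ===== SOURCE B (Python) =====
-- def split_overline_text(text: str) -> tuple[str, list[int]]:
--     """
--     Return clean text plus character indexes that carry an overline.
--
--     Split on backslashes and walk the segments, keeping a running length
--     of clean text seen so far.
--     """
--     parts = text.split("\\")
--     clean = "".join(parts)
--     overline: list[int] = []
--     length = 0
--     for part in parts[:-1]:
--         length += len(part)
--         if length > 0:
--             overline.append(length - 1)
--     return (clean, overline)
-- ===== Notes on version B (the rewrite author's own statement) =====
-- stated objective: idiomatic
-- what changed: B replaces A's char-by-char index loop with str.split on backslash, joining the parts for the clean text and a running-length pass over parts[:-1] to emit overline indices.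
import Mathlib
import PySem

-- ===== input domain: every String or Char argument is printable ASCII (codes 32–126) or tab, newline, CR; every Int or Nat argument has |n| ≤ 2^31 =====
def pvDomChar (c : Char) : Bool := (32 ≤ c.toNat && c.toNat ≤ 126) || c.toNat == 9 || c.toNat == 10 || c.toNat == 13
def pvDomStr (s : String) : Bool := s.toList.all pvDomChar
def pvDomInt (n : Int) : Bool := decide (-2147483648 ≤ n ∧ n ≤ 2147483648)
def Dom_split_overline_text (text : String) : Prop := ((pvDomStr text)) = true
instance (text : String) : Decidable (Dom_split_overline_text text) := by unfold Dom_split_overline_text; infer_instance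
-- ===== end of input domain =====

-- B replaces A's char-by-char index loop with split-on-backslash, join, and a
-- running-length pass over the parts before the last (idiomatic; same return value).


-- ===== PORT A =====
-- the while loop over index i becomes structural recursion over the character list,
-- carrying the clean_chars and overline_segments accumulators
def soWhile : List Char → List Char → List Int → String × List Int
  | [], clean, segs => (String.mk clean, segs)
  | c :: rest, clean, segs =>
    if c = '\\' then
      soWhile rest clean (if clean ≠ [] then segs ++ [(clean.length : Int) - 1] else segs)
    else
      soWhile rest (clean ++ [c]) segs

def split_overline_text (text : String) : String × List Int :=
  soWhile text.toList [] []

-- ===== PORT B =====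
-- the body of B's for-loop over parts[:-1] (running length, conditional append)
def sotStep (st : Int × List Int) (p : List Char) : Int × List Int :=
  let L := st.1 + (p.length : Int)
  (L, if 0 < L then st.2 ++ [L - 1] else st.2)

def split_overline_text_alt (text : String) : String × List Int :=
  let parts := PySem.Chars.splitOn text.toList ['\\']   -- text.split("\\")
  (String.mk (PySem.Chars.join [] parts),               -- "".join(parts)
   (parts.dropLast.foldl sotStep ((0 : Int), ([] : List Int))).2)

-- ===== PRECONDITION & SPEC =====
def Spec_split_overline_text (text : String) (out : String × List Int) : Prop := out = split_overline_text_alt text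
instance (text : String) (out : String × List Int) : Decidable (Spec_split_overline_text text out) := by unfold Spec_split_overline_text; infer_instance

-- ===== CLAIM (what is proved, stated in full; the proofs are below) =====
def Claim_equal_split_overline_text : Prop := ∀ (text : String), Dom_split_overline_text text → Spec_split_overline_text text (split_overline_text text)

-- ===== LEMMAS AND PROOFS =====

-- reference single-character splitter: splitOn with sep = ['\'] computes this
def splitOne : List Char → List Char → List (List Char)
  | [], cur => [cur.reverse]
  | c :: rest, cur =>
    if c = '\\' then cur.reverse :: splitOne rest []
    else splitOne rest (c :: cur)

theorem splitOn_go_eq (fuel : Nat) (l cur : List Char) (acc : List (List Char))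
    (h : l.length < fuel) :
    PySem.Chars.splitOn.go ['\\'] fuel l cur acc = acc.reverse ++ splitOne l cur := by
  induction fuel generalizing l cur acc with
  | zero => omega
  | succ n ih =>
    cases l with
    | nil => rw [PySem.Chars.splitOn.go.eq_def]; simp [splitOne]
    | cons c rest =>
      rw [PySem.Chars.splitOn.go.eq_def]
      have hlt : rest.length < n := by simpa using Nat.lt_of_succ_lt_succ h
      by_cases hc : c = '\\'
      · subst hc
        have hpre : List.isPrefixOf ['\\'] ('\\' :: rest) = true := by
          simp [List.isPrefixOf]
        simp only [hpre, if_true]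
        rw [ih _ _ _ (by simpa using hlt)]
        simp [splitOne]
      · have hpre : List.isPrefixOf ['\\'] (c :: rest) = false := by
          simp [List.isPrefixOf]; intro hh; exact hc hh.symm
        simp only [hpre, Bool.false_eq_true, if_false]
        rw [ih _ _ _ hlt]
        simp [splitOne, hc]

theorem splitOn_eq_splitOne (l : List Char) :
    PySem.Chars.splitOn l ['\\'] = splitOne l [] := by
  unfold PySem.Chars.splitOn
  rw [splitOn_go_eq _ _ _ _ (by omega)]
  simp

theorem splitOne_ne_nil (l cur : List Char) : splitOne l cur ≠ [] := by
  induction l generalizing cur with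
  | nil => simp [splitOne]
  | cons c rest ih =>
    by_cases hc : c = '\\' <;> simp [splitOne, hc, ih]

theorem splitOne_no_slash (l cur : List Char) (hcur : '\\' ∉ cur) :
    ∀ p ∈ splitOne l cur, '\\' ∉ p := by
  induction l generalizing cur with
  | nil => simpa [splitOne] using hcur
  | cons c rest ih =>
    by_cases hc : c = '\\'
    · subst hc
      have hrw : splitOne ('\\' :: rest) cur = cur.reverse :: splitOne rest [] := by
        simp [splitOne]
      rw [hrw]
      rintro p hp'
      rcases List.mem_cons.mp hp' with rfl | hp2
      · simpa using hcur
      · exact ih [] (by simp) p hp2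
    · simp only [splitOne, if_neg hc]
      exact ih (c :: cur) (by simp [hcur]; exact fun h => hc h.symm)

theorem intercalate_splitOne (l cur : List Char) :
    List.intercalate ['\\'] (splitOne l cur) = cur.reverse ++ l := by
  induction l generalizing cur with
  | nil => simp [splitOne, List.intercalate]
  | cons c rest ih =>
    by_cases hc : c = '\\'
    · subst hc
      have hrw : splitOne ('\\' :: rest) cur = cur.reverse :: splitOne rest [] := by
        simp [splitOne]
      rw [hrw]
      cases hs : splitOne rest [] with
      | nil => exact absurd hs (splitOne_ne_nil _ _)
      | cons q qs =>
        have hcc : List.intercalate ['\\'] (cur.reverse :: q :: qs)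
            = cur.reverse ++ ['\\'] ++ List.intercalate ['\\'] (q :: qs) := by
          simp [List.intercalate, List.intersperse]
        rw [hcc, ← hs, ih []]
        simp
    · have hrw : splitOne (c :: rest) cur = splitOne rest (c :: cur) := by
        simp [splitOne, hc]
      rw [hrw, ih (c :: cur)]
      simp

theorem joinNil_cons (p : List Char) (ps : List (List Char)) :
    PySem.Chars.join [] (p :: ps) = p ++ PySem.Chars.join [] ps := by
  cases ps with
  | nil => simp [PySem.Chars.join_singleton, PySem.Chars.join_nil]
  | cons q qs => rw [PySem.Chars.join_cons_cons]; simp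

theorem soWhile_no_slash (p : List Char) (hp : '\\' ∉ p) :
    ∀ rest clean segs, soWhile (p ++ rest) clean segs = soWhile rest (clean ++ p) segs := by
  induction p with
  | nil => intro rest clean segs; simp
  | cons c cs ih =>
    intro rest clean segs
    have hc : c ≠ '\\' := fun h => hp (h ▸ List.mem_cons_self ..)
    have hcs : '\\' ∉ cs := fun h => hp (List.mem_cons_of_mem _ h)
    simp only [List.cons_append, soWhile, if_neg hc]
    rw [ih hcs]
    simp

theorem soWhile_all (p : List Char) (hp : '\\' ∉ p) (clean : List Char) (segs : List Int) :
    soWhile p clean segs = (String.mk (clean ++ p), segs) := by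
  have := soWhile_no_slash p hp [] clean segs
  simpa [soWhile] using this

theorem soWhile_main (parts : List (List Char)) (hne : parts ≠ [])
    (hns : ∀ p ∈ parts, '\\' ∉ p) :
    ∀ clean segs, soWhile (List.intercalate ['\\'] parts) clean segs =
      (String.mk (clean ++ PySem.Chars.join [] parts),
       (parts.dropLast.foldl sotStep ((clean.length : Int), segs)).2) := by
  induction parts with
  | nil => exact absurd rfl hne
  | cons p ps ih =>
    intro clean segs
    have hp : '\\' ∉ p := hns p (List.mem_cons_self ..)
    cases ps with
    | nil =>
      have h1 : List.intercalate ['\\'] [p] = p := by simp [List.intercalate]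
      rw [h1, soWhile_all p hp clean segs]
      simp [PySem.Chars.join_singleton]
    | cons q qs =>
      have hqs : ∀ r ∈ q :: qs, '\\' ∉ r := fun r hr => hns r (List.mem_cons_of_mem _ hr)
      have hstep : List.intercalate ['\\'] (p :: q :: qs)
          = p ++ '\\' :: List.intercalate ['\\'] (q :: qs) := by
        simp [List.intercalate, List.intersperse]
      rw [hstep, soWhile_no_slash p hp _ clean segs]
      have hsl : soWhile ('\\' :: List.intercalate ['\\'] (q :: qs)) (clean ++ p) segs
          = soWhile (List.intercalate ['\\'] (q :: qs)) (clean ++ p)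
              (if clean ++ p ≠ [] then segs ++ [((clean ++ p).length : Int) - 1] else segs) := by
        simp [soWhile]
      rw [hsl, ih (by simp) hqs]
      have hdl : (p :: q :: qs).dropLast = p :: (q :: qs).dropLast := rfl
      rw [hdl, List.foldl_cons]
      have hL : sotStep (((clean.length : Nat) : Int), segs) p
          = (((clean ++ p).length : Int),
             if clean ++ p ≠ [] then segs ++ [((clean ++ p).length : Int) - 1] else segs) := by
        simp only [sotStep, List.length_append, Prod.mk.injEq]
        refine ⟨by push_cast; ring, ?_⟩
        by_cases h : clean ++ p = []
        · have hcp : clean = [] ∧ p = [] := by simpa using h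
          simp [hcp.1, hcp.2]
        · have hn : 0 < clean.length + p.length := by
            have := List.length_pos_iff.mpr h
            simpa [List.length_append] using this
          have hpos : (0 : Int) < (clean.length : Int) + (p.length : Int) := by exact_mod_cast hn
          rw [if_pos hpos, if_pos h]
          congr 2
      rw [hL]
      simp [joinNil_cons]

-- ===== VERDICT (by name: the statement is the Claim_ definition above) =====
theorem split_overline_text_spec : Claim_equal_split_overline_text := by
  intro text _
  unfold Spec_split_overline_text split_overline_text split_overline_text_alt
  rw [splitOn_eq_splitOne]
  have h2 := splitOne_no_slash text.toList [] (by simp)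
  have hm := soWhile_main (splitOne text.toList []) (splitOne_ne_nil _ _) h2 [] []
  rw [intercalate_splitOne text.toList []] at hm
  simp only [List.reverse_nil, List.nil_append, List.length_nil, Nat.cast_zero] at hm
  exact hm
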